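-- pv_equiv track=rewrite | github.com/cohere-ai/quick-start-connectors | klaviyo/provider/provider.py | check_result_by_template_attributes
-- ===== SOURCE A (Python) =====
-- from functools import reduce
--
-- def get_dict_value_by_dotted_key(dictionary, keys, default=None):
--     return reduce(
--         lambda d, key: d.get(key, default) if isinstance(d, dict) else default,
--         keys.split("."),
--         dictionary,
--     )
--
-- def search_by_keys_in_dict(dictionary, keys, query):
--     for key in keys:
--         value = get_dict_value_by_dotted_key(dictionary, key)
--         value = value.lower() if isinstance(value, str) else ""
--         query = query.lower()
--         keywords = query.split()
--         if any(keyword in value for keyword in keywords):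
--             return True
--     return False
--
-- def check_result_by_template_attributes(result, query):
--     templates_searchable_attributes = [
--         "attributes.name",
--         "attributes.html",
--         "attributes.text",
--     ]
--     for template in result["templates"]:
--         if search_by_keys_in_dict(template, templates_searchable_attributes, query):
--             return True
--     return False
-- ===== SOURCE B (Python) =====
-- def check_result_by_template_attributes(result, query):
--     keys = [("attributes", "name"), ("attributes", "html"), ("attributes", "text")]
--     parts = []
--     for template in result["templates"]:
--         for k1, k2 in keys:
--             inner = template.get(k1)
--             value = inner.get(k2) if isinstance(inner, dict) else None
--             parts.append(value.lower() if isinstance(value, str) else "")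
--     haystack = "\n".join(parts)
--     return any(keyword in haystack for keyword in query.lower().split())
-- ===== Notes on version B (the rewrite author's own statement) =====
-- stated objective: simpler
-- what changed: B replaces A's nested per-template/per-key/per-keyword short-circuit scans (with the dotted-key reduce lookup and query re-lowered and re-split on every key) by collecting all lowercased attribute values once, joining them into a single newline-separated haystack, and scanning each keyword of the once-computed query.lower().split() against that one string.
import Mathlib
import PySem

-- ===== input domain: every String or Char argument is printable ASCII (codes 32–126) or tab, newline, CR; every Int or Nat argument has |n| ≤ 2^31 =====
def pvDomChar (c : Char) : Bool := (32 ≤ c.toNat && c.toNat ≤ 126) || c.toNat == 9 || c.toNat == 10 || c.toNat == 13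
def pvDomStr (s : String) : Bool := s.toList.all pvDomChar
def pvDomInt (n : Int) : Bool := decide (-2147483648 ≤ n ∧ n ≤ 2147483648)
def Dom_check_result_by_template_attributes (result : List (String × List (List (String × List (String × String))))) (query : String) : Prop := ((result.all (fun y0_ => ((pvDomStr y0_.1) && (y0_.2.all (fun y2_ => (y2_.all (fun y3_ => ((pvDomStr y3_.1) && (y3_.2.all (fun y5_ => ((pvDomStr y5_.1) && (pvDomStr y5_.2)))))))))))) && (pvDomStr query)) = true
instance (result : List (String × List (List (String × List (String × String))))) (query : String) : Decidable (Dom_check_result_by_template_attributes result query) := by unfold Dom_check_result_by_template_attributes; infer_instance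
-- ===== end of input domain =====

-- B replaces A's nested per-template/per-key/per-keyword short-circuit scans by building the list of
-- lowercased attribute values once, joining it into one newline-separated haystack, and scanning each
-- keyword once against it (objective: simpler decomposition, same asymptotic cost).

-- ===== PORT A =====
-- Python's reduce runs over keys.split("."); the Lean element type fixes the nesting depth, so the
-- fold over the split segments is unrolled into matches (exact for the two-segment keys A uses;
-- a non-two-segment key ends on a non-string/short-circuited value, i.e. None → none).
def get_dict_value_by_dotted_key (dictionary : List (String × List (String × String))) (keys : String) : Option String :=
  match PySem.Str.split? keys "." with
  | some [k1, k2] =>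
      match List.lookup k1 dictionary with
      | some inner => List.lookup k2 inner
      | _ => none
  | _ => none

def search_by_keys_in_dict (dictionary : List (String × List (String × String))) (keys : List String) (query : String) : Bool :=
  keys.any (fun key =>
    let value : String :=
      match get_dict_value_by_dotted_key dictionary key with
      | some s => PySem.Str.lower s
      | none => ""
    let keywords := PySem.Str.split₀ (PySem.Str.lower query)
    keywords.any (fun keyword => PySem.Str.isIn keyword value))

def check_result_by_template_attributes (result : List (String × List (List (String × List (String × String))))) (query : String) : Bool :=
  match List.lookup "templates" result with
  | some templates =>
      templates.any (fun template =>
        search_by_keys_in_dict template ["attributes.name", "attributes.html", "attributes.text"] query)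
  | none => false   -- KeyError in Python; excluded by Pre_

-- ===== PORT B =====
def check_result_by_template_attributes_alt (result : List (String × List (List (String × List (String × String))))) (query : String) : Bool :=
  let keys : List (String × String) := [("attributes", "name"), ("attributes", "html"), ("attributes", "text")]
  let parts : List String :=
    ((List.lookup "templates" result).getD []).flatMap (fun template =>
      keys.map (fun k =>
        match List.lookup k.1 template with
        | some inner =>
            match List.lookup k.2 inner with
            | some v => PySem.Str.lower v
            | none => ""
        | none => ""))
  let haystack := PySem.Str.join "\n" parts
  (PySem.Str.split₀ (PySem.Str.lower query)).any (fun keyword => PySem.Str.isIn keyword haystack)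

-- ===== PRECONDITION & SPEC =====
-- Pre_ excludes exactly the inputs on which Python A raises KeyError: no "templates" key in result.
def Pre_check_result_by_template_attributes (result : List (String × List (List (String × List (String × String))))) (query : String) : Prop :=
  result.any (fun p => p.1 == "templates") = true
instance (result : List (String × List (List (String × List (String × String))))) (query : String) : Decidable (Pre_check_result_by_template_attributes result query) := by unfold Pre_check_result_by_template_attributes; infer_instance

def pvWitness_check_result_by_template_attributes : (List (String × List (List (String × List (String × String))))) × String :=
  ([("templates", [[("attributes", [("name", "Hello World")])]])], "hello")

def Spec_check_result_by_template_attributes (result : List (String × List (List (String × List (String × String))))) (query : String) (out : Bool) : Prop := out = check_result_by_template_attributes_alt result query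
instance (result : List (String × List (List (String × List (String × String))))) (query : String) (out : Bool) : Decidable (Spec_check_result_by_template_attributes result query out) := by unfold Spec_check_result_by_template_attributes; infer_instance

-- ===== CLAIM (what is proved, stated in full; the proofs are below) =====
def Claim_equal_check_result_by_template_attributes : Prop := ∀ (result : List (String × List (List (String × List (String × String))))) (query : String), Dom_check_result_by_template_attributes result query → Pre_check_result_by_template_attributes result query → Spec_check_result_by_template_attributes result query (check_result_by_template_attributes result query)

-- ===== LEMMAS AND PROOFS =====

-- Every word produced by str.split() is nonempty and whitespace-free (invariant of split₀.go).
theorem pv_split₀_go_words (s : List Char) :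
    ∀ (cur : List Char) (acc : List (List Char)),
      (∀ w ∈ acc, w ≠ [] ∧ ∀ c ∈ w, ¬ PySem.Chars.isspace c) →
      (cur ≠ [] → ∀ c ∈ cur, ¬ PySem.Chars.isspace c) →
      ∀ w ∈ PySem.Chars.split₀.go s cur acc, w ≠ [] ∧ ∀ c ∈ w, ¬ PySem.Chars.isspace c := by
  induction s with
  | nil =>
      intro cur acc hacc hcur w hw
      unfold PySem.Chars.split₀.go at hw
      by_cases h : cur.isEmpty
      · simp [h] at hw; exact hacc w hw
      · simp [h, List.mem_reverse] at hw
        rcases hw with h1 | h1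
        · exact hacc w h1
        · subst h1
          have hc := hcur (by simpa [List.isEmpty_iff] using h)
          constructor
          · simpa [List.isEmpty_iff] using h
          · intro c hc'; exact hc c (List.mem_reverse.mp hc')
  | cons c rest ih =>
      intro cur acc hacc hcur w hw
      unfold PySem.Chars.split₀.go at hw
      by_cases hs : PySem.Chars.isspace c
      · by_cases h : cur.isEmpty
        · simp [hs, h] at hw
          exact ih [] acc hacc (by simp) w hw
        · simp [hs, h] at hw
          refine ih [] (cur.reverse :: acc) ?_ (by simp) w hw
          intro w' hw'
          rcases List.mem_cons.mp hw' with h1 | h1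
          · subst h1
            have hc := hcur (by simpa [List.isEmpty_iff] using h)
            exact ⟨by simpa [List.isEmpty_iff] using h,
                   fun c' hc' => hc c' (List.mem_reverse.mp hc')⟩
          · exact hacc w' h1
      · simp [hs] at hw
        refine ih (c :: cur) acc hacc ?_ w hw
        intro _ c' hc'
        rcases List.mem_cons.mp hc' with h1 | h1
        · subst h1; exact hs
        · by_cases hc0 : cur = []
          · subst hc0; simp at h1
          · exact hcur hc0 c' h1

theorem pv_split₀_words {q w : List Char} (hw : w ∈ PySem.Chars.split₀ q) :
    w ≠ [] ∧ ∀ c ∈ w, ¬ PySem.Chars.isspace c :=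
  pv_split₀_go_words q [] [] (by simp) (by simp) w hw

-- A whitespace-free prefix of a ++ c :: b (c whitespace-free-excluded) is a prefix of a.
theorem pv_prefix_append_cons {kw : List Char} {c : Char} (hc : c ∉ kw) :
    ∀ {a b : List Char}, kw <+: a ++ c :: b → kw <+: a := by
  induction kw with
  | nil => intro a b _; exact List.nil_prefix
  | cons k kw' ih =>
      intro a b h
      cases a with
      | nil =>
          exfalso
          rcases List.cons_prefix_cons.mp h with ⟨hk, _⟩
          exact hc (by simp [hk])
      | cons x a' =>
          rcases List.cons_prefix_cons.mp h with ⟨hk, htail⟩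
          have hc' : c ∉ kw' := fun h' => hc (List.mem_cons_of_mem _ h')
          exact List.cons_prefix_cons.mpr ⟨hk, ih hc' htail⟩

-- An infix avoiding the separator character lies entirely on one side of it.
theorem pv_infix_append_cons {kw : List Char} {c : Char} (hc : c ∉ kw) :
    ∀ {a b : List Char}, kw <:+: a ++ c :: b → kw <:+: a ∨ kw <:+: b := by
  intro a
  induction a with
  | nil =>
      intro b h
      rcases List.infix_cons_iff.mp h with h1 | h1
      · have : kw <+: ([] : List Char) := pv_prefix_append_cons hc (by simpa using h1)
        simp_all
      · exact Or.inr h1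
  | cons x a' ih =>
      intro b h
      rcases List.infix_cons_iff.mp (by simpa using h) with h1 | h1
      · have : kw <+: x :: a' := pv_prefix_append_cons hc (by simpa using h1)
        exact Or.inl this.isInfix
      · rcases ih h1 with h2 | h2
        · exact Or.inl (h2.trans (List.suffix_cons x a').isInfix)
        · exact Or.inr h2

-- A newline-free nonempty word is in the '\n'-joined text iff it is in one of the pieces.
theorem pv_infix_join {kw : List Char} (hne : kw ≠ []) (hnl : '\n' ∉ kw) :
    ∀ (parts : List (List Char)),
      (kw <:+: PySem.Chars.join ['\n'] parts ↔ ∃ p ∈ parts, kw <:+: p) := by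
  intro parts
  induction parts with
  | nil => simp [PySem.Chars.join_nil, hne]
  | cons p rest ih =>
      cases rest with
      | nil => simp [PySem.Chars.join_singleton]
      | cons q r =>
          rw [PySem.Chars.join_cons_cons]
          constructor
          · intro h
            rcases pv_infix_append_cons hnl (by simpa [List.append_assoc] using h) with h1 | h1
            · exact ⟨p, by simp, h1⟩
            · rcases ih.mp h1 with ⟨w, hw1, hw2⟩
              exact ⟨w, List.mem_cons_of_mem _ hw1, hw2⟩
          · rintro ⟨w, hw1, hw2⟩
            rcases List.mem_cons.mp hw1 with h1 | h1
            · subst h1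
              exact hw2.trans ⟨[], ['\n'] ++ PySem.Chars.join ['\n'] (q :: r), by simp⟩
            · have := ih.mpr ⟨w, h1, hw2⟩
              have hsuf : PySem.Chars.join ['\n'] (q :: r) <:+: p ++ ['\n'] ++ PySem.Chars.join ['\n'] (q :: r) :=
                (List.suffix_append _ _).isInfix
              exact this.trans hsuf

-- the shared per-(template, key) value both programs compute
def pvVal (t : List (String × List (String × String))) (k1 k2 : String) : String :=
  match List.lookup k1 t with
  | some inner =>
      match List.lookup k2 inner with
      | some v => PySem.Str.lower v
      | none => ""
  | none => ""

theorem pv_valA (t : List (String × List (String × String))) (k1 k2 : String) (key : String)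
    (hk : PySem.Str.split? key "." = some [k1, k2]) :
    (match get_dict_value_by_dotted_key t key with
     | some s => PySem.Str.lower s
     | none => "") = pvVal t k1 k2 := by
  unfold get_dict_value_by_dotted_key pvVal
  rw [hk]
  cases hI : List.lookup k1 t with
  | none => simp [hI]
  | some inner =>
      cases hJ : List.lookup k2 inner with
      | none => simp [hI, hJ]
      | some v => simp [hI, hJ]

-- keyword ∈ query.lower().split() → it is nonempty and newline-free
theorem pv_kw_props {query kw : String} (h : kw ∈ PySem.Str.split₀ (PySem.Str.lower query)) :
    kw.toList ≠ [] ∧ '\n' ∉ kw.toList := by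
  have hmem : kw.toList ∈ PySem.Chars.split₀ (PySem.Str.lower query).toList := by
    rw [← PySem.Str.split₀_map_toList]
    exact List.mem_map_of_mem h
  rcases pv_split₀_words hmem with ⟨h1, h2⟩
  exact ⟨h1, fun hc => h2 '\n' hc (by decide)⟩

-- ===== VERDICT (by name: the statement is the Claim_ definition above) =====
theorem check_result_by_template_attributes_spec : Claim_equal_check_result_by_template_attributes := by
  intro result query _ hpre
  unfold Spec_check_result_by_template_attributes
  unfold check_result_by_template_attributes check_result_by_template_attributes_alt
  cases hL : List.lookup "templates" result with
  | none =>
      -- Pre_ rules this case out: "templates" is a key of result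
      exfalso
      unfold Pre_check_result_by_template_attributes at hpre
      simp only [List.any_eq_true, beq_iff_eq] at hpre
      rcases hpre with ⟨p, hp, hp1⟩
      rw [List.lookup_eq_none_iff] at hL
      have := hL p hp
      simp [hp1] at this
  | some templates =>
      simp only [Option.getD_some]
      rw [Bool.eq_iff_iff]
      simp only [List.any_eq_true, search_by_keys_in_dict]
      constructor
      · rintro ⟨t, ht, key, hkey, kw, hkw, hin⟩
        -- A found kw in the value of (t, key); show B finds kw in the haystack
        refine ⟨kw, hkw, ?_⟩
        rcases pv_kw_props hkw with ⟨h1, h2⟩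
        rw [PySem.Str.isIn_iff_infix, PySem.Str.toList_join,
            show ("\n".toList) = ['\n'] from rfl, pv_infix_join h1 h2]
        fin_cases hkey <;>
        [ (rw [pv_valA t "attributes" "name" _ (by decide)] at hin);
          (rw [pv_valA t "attributes" "html" _ (by decide)] at hin);
          (rw [pv_valA t "attributes" "text" _ (by decide)] at hin)] <;>
        · refine ⟨(pvVal t "attributes" _).toList, ?_, (PySem.Str.isIn_iff_infix _ _).mp hin⟩
          simp only [List.mem_map, List.mem_flatMap]
          exact ⟨pvVal t "attributes" _, ⟨t, ht, by simp [pvVal]⟩, rfl⟩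
      · rintro ⟨kw, hkw, hin⟩
        rcases pv_kw_props hkw with ⟨h1, h2⟩
        rw [PySem.Str.isIn_iff_infix, PySem.Str.toList_join,
            show ("\n".toList) = ['\n'] from rfl, pv_infix_join h1 h2] at hin
        rcases hin with ⟨pc, hpc, hinf⟩
        rcases List.mem_map.mp hpc with ⟨p, hp, rfl⟩
        rcases List.mem_flatMap.mp hp with ⟨t, ht, hpt⟩
        simp only [List.mem_map, List.mem_cons, List.not_mem_nil, or_false] at hpt
        rcases hpt with ⟨k, hk, rfl⟩
        refine ⟨t, ht, ?_⟩
        rcases hk with rfl | rfl | rfl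
        · exact ⟨"attributes.name", by simp, kw, hkw, by
            rw [pv_valA t "attributes" "name" _ (by decide)]
            exact (PySem.Str.isIn_iff_infix _ _).mpr hinf⟩
        · exact ⟨"attributes.html", by simp, kw, hkw, by
            rw [pv_valA t "attributes" "html" _ (by decide)]
            exact (PySem.Str.isIn_iff_infix _ _).mpr hinf⟩
        · exact ⟨"attributes.text", by simp, kw, hkw, by
            rw [pv_valA t "attributes" "text" _ (by decide)]
            exact (PySem.Str.isIn_iff_infix _ _).mpr hinf⟩
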